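-- pv_equiv track=rewrite | github.com/NikhilaBanukumar/GeeksForGeeks-and-Leetcode | strings7.py | printrest
-- ===== SOURCE A (Python) =====
-- def printrest(string,char,n):
--     count=0
--     for i in range(len(string)):
--         if string[i]==char:
--             count+=1
--             if count==n:
--                 return string[i+1:]
--     return "No string remaining"
-- ===== SOURCE B (Python) =====
-- def _first_match(s, char):
--     for i, c in enumerate(s):
--         if c == char:
--             return i
--     return None
--
--
-- def printrest(string, char, n):
--     # Peel: repeatedly cut the string just after its FIRST occurrence of char,
--     # decrementing n, instead of counting occurrences along one indexed scan.
--     s = string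
--     while n >= 1:
--         i = _first_match(s, char)
--         if i is None:
--             return "No string remaining"
--         s = s[i + 1:]
--         if n == 1:
--             return s
--         n -= 1
--     return "No string remaining"
-- ===== Notes on version B (the rewrite author's own statement) =====
-- stated objective: alternative
-- what changed: Replaces A's single indexed counting scan with an iterative peeling loop: repeatedly find the first occurrence in the remaining suffix, slice the string after it and decrement n until n reaches 1.
import Mathlib
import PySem

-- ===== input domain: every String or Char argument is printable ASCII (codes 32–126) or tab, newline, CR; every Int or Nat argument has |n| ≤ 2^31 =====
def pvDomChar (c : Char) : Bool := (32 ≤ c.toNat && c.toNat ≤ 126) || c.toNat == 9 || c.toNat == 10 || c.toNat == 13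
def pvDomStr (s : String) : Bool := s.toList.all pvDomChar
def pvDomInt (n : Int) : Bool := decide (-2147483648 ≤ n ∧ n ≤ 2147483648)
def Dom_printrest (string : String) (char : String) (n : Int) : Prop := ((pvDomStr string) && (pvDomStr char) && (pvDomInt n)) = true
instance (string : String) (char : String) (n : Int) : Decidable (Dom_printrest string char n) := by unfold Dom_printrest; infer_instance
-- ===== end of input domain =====

-- B is an alternative decomposition: an iterative peeling loop that repeatedly cuts the
-- string just after its first occurrence of char and decrements n, instead of A's
-- single indexed counting scan.

-- ===== PORT A =====
-- the loop `for i in range(len(string))` visiting string[i] is transliterated as structural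
-- recursion over the character list, carrying the same `count`; string[i+1:] is the suffix.
def printrestGo (ch : List Char) (n : Int) : List Char → Int → String
  | [], _ => "No string remaining"
  | c :: rest, count =>
    if [c] = ch then
      if count + 1 = n then String.mk rest
      else printrestGo ch n rest (count + 1)
    else printrestGo ch n rest count

def printrest (string : String) (char : String) (n : Int) : String :=
  printrestGo char.toList n string.toList 0

-- ===== PORT B =====
-- `for i, c in enumerate(s): if c == char: return i` / `return None`
def firstMatch (ch : List Char) : List Char → Option Nat
  | [] => none
  | c :: rest => if [c] = ch then some 0 else (firstMatch ch rest).map (· + 1)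

theorem firstMatch_lt (ch : List Char) : ∀ (s : List Char) (i : Nat),
    firstMatch ch s = some i → i < s.length := by
  intro s
  induction s with
  | nil => intro i h; simp [firstMatch] at h
  | cons c rest ih =>
    intro i h
    by_cases hc : [c] = ch
    · simp [firstMatch, hc] at h
      simp only [List.length_cons]; omega
    · simp only [firstMatch, hc, if_false, Option.map_eq_some_iff] at h
      obtain ⟨j, hj, hji⟩ := h
      have := ih j hj
      simp only [List.length_cons]; omega

-- the `while n >= 1` loop; `s[i + 1:]` with i ≥ 0 is exactly `List.drop (i+1)`
def peel (ch : List Char) (s : List Char) (n : Int) : String :=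
  if 1 ≤ n then
    match h : firstMatch ch s with
    | none => "No string remaining"
    | some i =>
      if n = 1 then String.mk (s.drop (i + 1))
      else peel ch (s.drop (i + 1)) (n - 1)
  else "No string remaining"
termination_by s.length
decreasing_by
  have := firstMatch_lt ch s i h
  simp only [List.length_drop]; omega

def printrest_alt (string : String) (char : String) (n : Int) : String :=
  peel char.toList string.toList n

-- ===== PRECONDITION & SPEC =====
def Spec_printrest (string : String) (char : String) (n : Int) (out : String) : Prop := out = printrest_alt string char n
instance (string : String) (char : String) (n : Int) (out : String) : Decidable (Spec_printrest string char n out) := by unfold Spec_printrest; infer_instance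

-- ===== CLAIM (what is proved, stated in full; the proofs are below) =====
def Claim_equal_printrest : Prop := ∀ (string : String) (char : String) (n : Int), Dom_printrest string char n → Spec_printrest string char n (printrest string char n)

-- ===== LEMMAS AND PROOFS =====

-- canonical middle form: A with the counter folded into n
def canonRest (ch : List Char) : Int → List Char → String
  | _, [] => "No string remaining"
  | n, c :: rest =>
    if [c] = ch then (if n = 1 then String.mk rest else canonRest ch (n - 1) rest)
    else canonRest ch n rest

theorem printrestGo_shift (ch : List Char) (l : List Char) :
    ∀ (n count : Int), printrestGo ch n l count = printrestGo ch (n - count) l 0 := by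
  induction l with
  | nil => intro n count; rfl
  | cons c rest ih =>
    intro n count
    simp only [printrestGo]
    by_cases h : [c] = ch
    · simp only [h, if_true]
      by_cases h1 : count + 1 = n
      · have : (0 : Int) + 1 = n - count := by omega
        simp [h1, this]
      · have : ¬ ((0 : Int) + 1 = n - count) := by omega
        simp only [h1, if_false, this]
        rw [ih n (count + 1), ih (n - count) (0 + 1)]
        have he : n - (count + 1) = n - count - (0 + 1) := by omega
        rw [he]
    · simp only [h, if_false]
      rw [ih n count]

theorem printrestGo_eq_canon (ch : List Char) (l : List Char) :
    ∀ (n : Int), printrestGo ch n l 0 = canonRest ch n l := by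
  induction l with
  | nil => intro n; rfl
  | cons c rest ih =>
    intro n
    simp only [printrestGo, canonRest, zero_add]
    by_cases h : [c] = ch
    · simp only [h, if_true]
      by_cases h1 : (1 : Int) = n
      · simp [h1]
      · have h1' : ¬ (n = 1) := fun hh => h1 hh.symm
        simp only [h1, h1', if_false]
        rw [printrestGo_shift, ih]
    · simp [h, ih n]

theorem canon_nonpos (ch : List Char) : ∀ (l : List Char) (n : Int), n ≤ 0 →
    canonRest ch n l = "No string remaining" := by
  intro l
  induction l with
  | nil => intro n _; rfl
  | cons c rest ih =>
    intro n hn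
    simp only [canonRest]
    by_cases h : [c] = ch
    · have h1 : ¬ (n = 1) := by omega
      simp only [h, if_true, h1, if_false]
      exact ih (n - 1) (by omega)
    · simp only [h, if_false]
      exact ih n hn

theorem peel_eq_canon (ch : List Char) : ∀ (l : List Char) (n : Int),
    peel ch l n = canonRest ch n l := by
  intro l
  induction l with
  | nil =>
    intro n
    rw [peel]
    by_cases hn : 1 ≤ n <;> simp [hn, firstMatch, canonRest]
  | cons c rest ih =>
    intro n
    by_cases h : [c] = ch
    · have hfm : firstMatch ch (c :: rest) = some 0 := by simp [firstMatch, h]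
      rw [peel]
      simp only [canonRest, h, if_true]
      by_cases hn : 1 ≤ n
      · simp only [hn, if_true]
        split
        · next heq => rw [hfm] at heq; cases heq
        · next i heq =>
            rw [hfm] at heq
            injection heq with hi
            subst hi
            simp only [List.drop_succ_cons, List.drop_zero]
            by_cases hn1 : n = 1
            · simp [hn1]
            · simp only [hn1, if_false]
              exact ih (n - 1)
      · simp only [hn, if_false]
        have hn1 : ¬ n = 1 := by omega
        simp only [hn1, if_false]
        exact (canon_nonpos ch rest (n - 1) (by omega)).symm
    · have hfm : firstMatch ch (c :: rest) = (firstMatch ch rest).map (· + 1) := by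
        simp [firstMatch, h]
      simp only [canonRest, h, if_false]
      rw [← ih n, peel, peel]
      by_cases hn : 1 ≤ n
      · simp only [hn, if_true]
        cases hr : firstMatch ch rest with
        | none =>
          have hc' : firstMatch ch (c :: rest) = none := by simp [hfm, hr]
          split
          · rfl
          · next i heq => rw [hc'] at heq; cases heq
        | some i =>
          have hc' : firstMatch ch (c :: rest) = some (i + 1) := by simp [hfm, hr]
          split
          · next heq => rw [hc'] at heq; cases heq
          · next j heq =>
              rw [hc'] at heq
              injection heq with hj
              subst hj
              rw [List.drop_succ_cons]
      · simp [hn]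

-- ===== VERDICT (by name: the statement is the Claim_ definition above) =====
theorem printrest_spec : Claim_equal_printrest := by
  intro string char n _
  unfold Spec_printrest printrest printrest_alt
  rw [printrestGo_eq_canon, peel_eq_canon]
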